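-- pv_equiv track=rewrite | github.com/zirui2333/NTT-Sumcheck | assignment2/scripts/custom_cases.py | _eval_table_at_point
-- ===== SOURCE A (Python) =====
-- def _eval_at_point(zero_eval, one_eval, target_eval, q):
--     q = int(q)
--     z = int(zero_eval) % q
--     o = int(one_eval) % q
--     t = int(target_eval) % q
--     return (z + ((o - z) % q) * t) % q
--
-- def _eval_table_at_point(table_values, challenges, q):
--     cur = [int(v) % int(q) for v in table_values]
--     for challenge in challenges:
--         if len(cur) % 2 != 0:
--             raise ValueError(
--                 f"Table length must remain even during oracle evaluation; got {len(cur)}"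
--             )
--         next_cur = []
--         for i in range(0, len(cur), 2):
--             next_cur.append(_eval_at_point(cur[i], cur[i + 1], challenge, q))
--         cur = next_cur
--
--     if len(cur) != 1:
--         raise ValueError(f"Oracle table reduction expected length=1, got {len(cur)}")
--     return int(cur[0]) % int(q)
-- ===== SOURCE B (Python) =====
-- def _eval_table_at_point(table_values, challenges, q):
--     q = int(q)
--     # Build per-index Lagrange weights over the hypercube: weights[b] is the
--     # product over bit j of b of (1-t_j) or t_j (LSB = first challenge), so the
--     # whole evaluation is a single weighted sum of the original table mod q.
--     weights = [1]
--     for challenge in challenges: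
--         t = int(challenge)
--         weights = [w * (1 - t) for w in weights] + [w * t for w in weights]
--     if len(table_values) != len(weights):
--         raise ValueError(
--             f"Table length must be 2^len(challenges); got {len(table_values)}"
--         )
--     return sum(int(v) * w for v, w in zip(table_values, weights)) % q
-- ===== Notes on version B (the rewrite author's own statement) =====
-- stated objective: alternative
-- what changed: Replaces the k successive halving passes (pairwise folding of the table by each challenge) with a single weighted sum: a Lagrange weight table of size 2^k is expanded once over the challenges and the answer is the dot product of the original table with it, reduced mod q once at the end.
import Mathlib
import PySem

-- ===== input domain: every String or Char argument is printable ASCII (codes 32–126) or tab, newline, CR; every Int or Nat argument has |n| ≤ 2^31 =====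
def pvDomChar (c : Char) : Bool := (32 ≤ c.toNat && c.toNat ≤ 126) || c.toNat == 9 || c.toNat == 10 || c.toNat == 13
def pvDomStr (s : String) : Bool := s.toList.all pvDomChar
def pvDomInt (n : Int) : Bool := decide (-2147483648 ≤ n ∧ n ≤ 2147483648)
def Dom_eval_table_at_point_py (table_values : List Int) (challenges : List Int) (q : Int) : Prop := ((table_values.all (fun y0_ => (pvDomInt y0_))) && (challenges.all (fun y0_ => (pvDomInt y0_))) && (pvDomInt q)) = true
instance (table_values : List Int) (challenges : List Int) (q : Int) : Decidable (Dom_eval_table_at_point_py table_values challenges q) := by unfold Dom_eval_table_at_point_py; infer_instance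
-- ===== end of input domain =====

-- B replaces A's k successive pairwise-halving passes by one expansion of a
-- 2^k Lagrange weight table followed by a single weighted sum mod q (alternative
-- decomposition, same asymptotic cost).


-- ===== PORT A =====
-- _eval_at_point helper, literal
def pyEvalAtPoint (zero_eval one_eval target_eval q : Int) : Int :=
  let z := PySem.Int.mod zero_eval q
  let o := PySem.Int.mod one_eval q
  let t := PySem.Int.mod target_eval q
  PySem.Int.mod (z + (PySem.Int.mod (o - z) q) * t) q

-- the inner 'for i in range(0, len(cur), 2)' pass: pairs adjacent entries
-- (cur[i], cur[i+1]); on an odd tail A raises, so the port stops there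
def pyPairPass (t q : Int) : List Int → List Int
  | a :: b :: rest => pyEvalAtPoint a b t q :: pyPairPass t q rest
  | _ => []

def eval_table_at_point_py (table_values : List Int) (challenges : List Int) (q : Int) : Int :=
  let cur := table_values.map (fun v => PySem.Int.mod v q)
  let final := challenges.foldl (fun c t => pyPairPass t q c) cur
  PySem.Int.mod (final.headD 0) q

-- ===== PORT B =====
-- weights = [w*(1-t) for w in weights] + [w*t for w in weights]
def altExpand (ws : List Int) (t : Int) : List Int :=
  ws.map (fun w => w * (1 - t)) ++ ws.map (fun w => w * t)

def eval_table_at_point_py_alt (table_values : List Int) (challenges : List Int) (q : Int) : Int :=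
  let weights := challenges.foldl altExpand [1]
  PySem.Int.mod ((table_values.zip weights).foldl (fun s vw => s + vw.1 * vw.2) 0) q

-- ===== PRECONDITION & SPEC =====
-- Pre_ excludes exactly the inputs where A raises: q = 0 (ZeroDivisionError in the
-- initial reduction) and table lengths ≠ 2^len(challenges) (A's ValueError on an odd
-- intermediate length or on a final length ≠ 1).
def Pre_eval_table_at_point_py (table_values : List Int) (challenges : List Int) (q : Int) : Prop :=
  table_values.length = 2 ^ challenges.length ∧ q ≠ 0
instance (table_values : List Int) (challenges : List Int) (q : Int) : Decidable (Pre_eval_table_at_point_py table_values challenges q) := by unfold Pre_eval_table_at_point_py; infer_instance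

def pvWitness_eval_table_at_point_py : List Int × List Int × Int := ([3, 5], [2], 7)

def Spec_eval_table_at_point_py (table_values : List Int) (challenges : List Int) (q : Int) (out : Int) : Prop := out = eval_table_at_point_py_alt table_values challenges q
instance (table_values : List Int) (challenges : List Int) (q : Int) (out : Int) : Decidable (Spec_eval_table_at_point_py table_values challenges q out) := by unfold Spec_eval_table_at_point_py; infer_instance

-- ===== CLAIM (what is proved, stated in full; the proofs are below) =====
def Claim_equal_eval_table_at_point_py : Prop := ∀ (table_values : List Int) (challenges : List Int) (q : Int), Dom_eval_table_at_point_py table_values challenges q → Pre_eval_table_at_point_py table_values challenges q → Spec_eval_table_at_point_py table_values challenges q (eval_table_at_point_py table_values challenges q)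

-- ===== LEMMAS AND PROOFS =====

-- dot product used to reason about B's zip-fold
def pvDot : List Int → List Int → Int
  | x :: xs, w :: ws => x * w + pvDot xs ws
  | _, _ => 0

theorem pvDot_nil_right (xs : List Int) : pvDot xs [] = 0 := by
  cases xs <;> rfl

theorem zip_foldl_eq_pvDot (xs ws : List Int) (s : Int) :
    (xs.zip ws).foldl (fun s vw => s + vw.1 * vw.2) s = s + pvDot xs ws := by
  induction xs generalizing ws s with
  | nil => simp [pvDot]
  | cons x xs ih =>
    cases ws with
    | nil => simp [pvDot_nil_right]
    | cons w ws =>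
      rw [show (x :: xs).zip (w :: ws) = (x, w) :: xs.zip ws from rfl, List.foldl_cons]
      rw [ih ws (s + x * w)]
      simp [pvDot, add_assoc]

theorem fmod_modEq (a q : Int) : Int.ModEq q (PySem.Int.mod a q) a := by
  show Int.ModEq q (Int.fmod a q) a
  rw [Int.modEq_iff_dvd]
  exact ⟨a.fdiv q, by rw [Int.fmod_def]; ring⟩

theorem mod_congr {a b q : Int} (h : Int.ModEq q a b) :
    PySem.Int.mod a q = PySem.Int.mod b q := by
  show Int.fmod a q = Int.fmod b q
  have hmod : a % q = b % q := h
  have hiff : (0 ≤ q ∨ q ∣ a) ↔ (0 ≤ q ∨ q ∣ b) := by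
    rw [Int.dvd_iff_emod_eq_zero, Int.dvd_iff_emod_eq_zero, hmod]
  rw [Int.fmod_eq_emod, Int.fmod_eq_emod, hmod, if_congr hiff rfl rfl]

theorem evalAtPoint_modEq (a b t q : Int) :
    Int.ModEq q (pyEvalAtPoint a b t q) (a * (1 - t) + b * t) := by
  unfold pyEvalAtPoint
  have hz := fmod_modEq a q
  have ho := fmod_modEq b q
  have ht := fmod_modEq t q
  have hdz := fmod_modEq (PySem.Int.mod b q - PySem.Int.mod a q) q
  have h1 : Int.ModEq q
      (PySem.Int.mod a q + PySem.Int.mod (PySem.Int.mod b q - PySem.Int.mod a q) q * PySem.Int.mod t q)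
      (a + (b - a) * t) :=
    Int.ModEq.add hz (Int.ModEq.mul (hdz.trans (Int.ModEq.sub ho hz)) ht)
  have h2 : a + (b - a) * t = a * (1 - t) + b * t := by ring
  exact (fmod_modEq _ q).trans (h2 ▸ h1)

theorem expand_foldl (ch : List Int) : ∀ ws : List Int,
    ch.foldl altExpand ws = (ch.foldl altExpand [1]).flatMap (fun w => ws.map (· * w)) := by
  induction ch with
  | nil => intro ws; simp
  | cons t ch ih =>
    intro ws
    have lhs := ih (altExpand ws t)
    have rhs := ih (altExpand [1] t)
    simp only [List.foldl_cons, lhs, rhs, List.flatMap_assoc]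
    apply List.flatMap_congr
    intro w _
    simp [altExpand, List.map_map]

theorem weights_cons (t : Int) (ch : List Int) :
    (t :: ch).foldl altExpand [1]
      = (ch.foldl altExpand [1]).flatMap (fun w => [(1 - t) * w, t * w]) := by
  have h := expand_foldl ch (altExpand [1] t)
  simp only [List.foldl_cons] at *
  rw [h]
  apply List.flatMap_congr
  intro w _
  simp [altExpand]

theorem foldl_altExpand_length (ch : List Int) : ∀ ws : List Int,
    (ch.foldl altExpand ws).length = 2 ^ ch.length * ws.length := by
  induction ch with
  | nil => intro ws; simp
  | cons t ch ih =>
    intro ws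
    simp only [List.foldl_cons, ih (altExpand ws t)]
    simp [altExpand, pow_succ]
    ring

theorem pairPass_length (t q : Int) : ∀ l : List Int, (pyPairPass t q l).length = l.length / 2
  | [] => by simp [pyPairPass]
  | [_] => by simp [pyPairPass]
  | a :: b :: rest => by
      simp [pyPairPass, pairPass_length t q rest]
      omega

theorem step_modEq (t q : Int) : ∀ (W cur : List Int), cur.length = 2 * W.length →
    Int.ModEq q (pvDot (pyPairPass t q cur) W)
      (pvDot cur (W.flatMap (fun w => [(1 - t) * w, t * w]))) := by
  intro W
  induction W with
  | nil => intro cur h; simp [pvDot_nil_right]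
  | cons w W ih =>
    intro cur h
    match cur, h with
    | a :: b :: rest, h =>
      have hrest : rest.length = 2 * W.length := by simp at h; omega
      have ihr := ih rest hrest
      have he : Int.ModEq q (pyEvalAtPoint a b t q * w) ((a * (1 - t) + b * t) * w) :=
        Int.ModEq.mul_right w (evalAtPoint_modEq a b t q)
      have hsum := Int.ModEq.add he ihr
      have hring : (a * (1 - t) + b * t) * w + pvDot rest (W.flatMap fun w => [(1 - t) * w, t * w])
          = a * ((1 - t) * w) + (b * (t * w) + pvDot rest (W.flatMap fun w => [(1 - t) * w, t * w])) := by
        ring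
      simpa [pyPairPass, pvDot, hring] using hsum

theorem main_modEq (q : Int) (ch : List Int) : ∀ cur : List Int, cur.length = 2 ^ ch.length →
    Int.ModEq q ((ch.foldl (fun c t => pyPairPass t q c) cur).headD 0)
      (pvDot cur (ch.foldl altExpand [1])) := by
  induction ch with
  | nil =>
    intro cur h
    match cur, h with
    | [x], _ => simp [pvDot]
  | cons t ch ih =>
    intro cur h
    have hlen : (pyPairPass t q cur).length = 2 ^ ch.length := by
      rw [pairPass_length t q cur, h]
      simp only [List.length_cons, pow_succ]
      omega
    have h1 := ih (pyPairPass t q cur) hlen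
    have hW : (ch.foldl altExpand [1]).length = 2 ^ ch.length := by
      simpa using foldl_altExpand_length ch [1]
    have h2 := step_modEq t q (ch.foldl altExpand [1]) cur (by
      rw [h, hW]
      simp only [List.length_cons, pow_succ]
      omega)
    rw [weights_cons]
    exact (h1.trans h2)

theorem dot_map_mod (q : Int) : ∀ (xs ws : List Int),
    Int.ModEq q (pvDot (xs.map (fun v => PySem.Int.mod v q)) ws) (pvDot xs ws) := by
  intro xs
  induction xs with
  | nil => intro ws; simp [pvDot]
  | cons x xs ih =>
    intro ws
    cases ws with
    | nil => simp [pvDot_nil_right]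
    | cons w ws =>
      simpa [pvDot] using Int.ModEq.add (Int.ModEq.mul_right w (fmod_modEq x q)) (ih ws)

-- ===== VERDICT (by name: the statement is the Claim_ definition above) =====
theorem eval_table_at_point_py_spec : Claim_equal_eval_table_at_point_py := by
  intro tv ch q _hdom hpre
  unfold Spec_eval_table_at_point_py
  show PySem.Int.mod ((ch.foldl (fun c t => pyPairPass t q c) (tv.map (fun v => PySem.Int.mod v q))).headD 0) q
      = PySem.Int.mod ((tv.zip (ch.foldl altExpand [1])).foldl (fun s vw => s + vw.1 * vw.2) 0) q
  rw [zip_foldl_eq_pvDot, zero_add]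
  apply mod_congr
  have hlen : (tv.map (fun v => PySem.Int.mod v q)).length = 2 ^ ch.length := by
    simpa using hpre.1
  exact (main_modEq q ch _ hlen).trans (dot_map_mod q tv (ch.foldl altExpand [1]))
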